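-- pv_equiv track=rewrite | github.com/Grrim/video-subtitle-translator | src/services/subtitle_generator.py | _redistribute_text
-- ===== SOURCE A (Python) =====
-- from typing import List, Dict, Any
--
-- def _redistribute_text(text: str, num_segments: int) -> List[str]:
--     """Redystrybuuj tekst na określoną liczbę segmentów"""
--     words = text.split()
--     words_per_segment = len(words) // num_segments
--
--     segments = []
--     for i in range(num_segments):
--         start_idx = i * words_per_segment
--         if i == num_segments - 1:  # Ostatni segment - weź wszystkie pozostałe słowa
--             end_idx = len(words)
--         else:
--             end_idx = (i + 1) * words_per_segment
--
--         segment_text = ' '.join(words[start_idx:end_idx])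
--         segments.append(segment_text)
--
--     return segments
-- ===== SOURCE B (Python) =====
-- from typing import List
--
--
-- def _redistribute_text(text: str, num_segments: int) -> List[str]:
--     """Split text into num_segments chunks by consuming the word list front-to-back."""
--     words = text.split()
--     if num_segments <= 0:
--         return []
--     wps = len(words) // num_segments
--     segments = []
--     rest = words
--     for _ in range(num_segments - 1):
--         segments.append(' '.join(rest[:wps]))
--         rest = rest[wps:]
--     segments.append(' '.join(rest))
--     return segments
-- ===== Notes on version B (the rewrite author's own statement) =====
-- stated objective: alternative
-- what changed: Instead of computing absolute start/end indices and slicing the original word list for each of the num_segments range indices (with a last-segment branch inside the loop), B consumes the word list sequentially, peeling off words_per_segment words per segment for the first num_segments-1 segments and joining the remainder as the last segment.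
import Mathlib
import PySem

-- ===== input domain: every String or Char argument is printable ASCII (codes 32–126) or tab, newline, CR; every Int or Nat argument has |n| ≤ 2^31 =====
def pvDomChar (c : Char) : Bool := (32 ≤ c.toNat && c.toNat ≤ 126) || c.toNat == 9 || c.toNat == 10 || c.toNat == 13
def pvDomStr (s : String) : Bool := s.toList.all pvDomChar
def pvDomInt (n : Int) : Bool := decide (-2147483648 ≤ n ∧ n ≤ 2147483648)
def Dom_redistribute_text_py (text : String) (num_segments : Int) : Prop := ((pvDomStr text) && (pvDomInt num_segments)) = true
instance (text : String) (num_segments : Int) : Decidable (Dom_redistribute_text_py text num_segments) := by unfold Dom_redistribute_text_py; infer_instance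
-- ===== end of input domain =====

-- B consumes the word list sequentially (take wps / drop wps per segment, remainder last)
-- instead of slicing absolute index ranges per range index with a last-segment branch.

-- ===== PORT A =====
def redistribute_text_py (text : String) (num_segments : Int) : List String :=
  let words := PySem.Str.split₀ text
  let words_per_segment := PySem.Int.floordiv (words.length : Int) num_segments
  (PySem.List.pyRange 0 num_segments).foldl (fun segments i =>
    let start_idx := i * words_per_segment
    let end_idx := if i = num_segments - 1 then (words.length : Int)
                   else (i + 1) * words_per_segment
    segments ++ [PySem.Str.join " " (PySem.List.slice words (some start_idx) (some end_idx))]) []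

-- ===== PORT B =====
def redistribute_text_py_alt (text : String) (num_segments : Int) : List String :=
  let words := PySem.Str.split₀ text
  if num_segments ≤ 0 then []
  else
    let wps := PySem.Int.floordiv (words.length : Int) num_segments
    let st := (PySem.List.pyRange 0 (num_segments - 1)).foldl
      (fun (st : List String × List String) _ =>
        (st.1 ++ [PySem.Str.join " " (PySem.List.slice st.2 none (some wps))],
         PySem.List.slice st.2 (some wps) none)) (([] : List String), words)
    st.1 ++ [PySem.Str.join " " st.2]

-- ===== PRECONDITION & SPEC =====
-- Pre_ excludes exactly num_segments = 0, where the Python A raises ZeroDivisionError.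
def Pre_redistribute_text_py (text : String) (num_segments : Int) : Prop := num_segments ≠ 0
instance (text : String) (num_segments : Int) : Decidable (Pre_redistribute_text_py text num_segments) := by unfold Pre_redistribute_text_py; infer_instance
def pvWitness_redistribute_text_py : String × Int := ("one two three four five", 2)

def Spec_redistribute_text_py (text : String) (num_segments : Int) (out : List String) : Prop := out = redistribute_text_py_alt text num_segments
instance (text : String) (num_segments : Int) (out : List String) : Decidable (Spec_redistribute_text_py text num_segments out) := by unfold Spec_redistribute_text_py; infer_instance

-- ===== CLAIM (what is proved, stated in full; the proofs are below) =====
def Claim_equal_redistribute_text_py : Prop := ∀ (text : String) (num_segments : Int), Dom_redistribute_text_py text num_segments → Pre_redistribute_text_py text num_segments → Spec_redistribute_text_py text num_segments (redistribute_text_py text num_segments)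

-- ===== LEMMAS AND PROOFS =====

-- B's loop invariant: after |l| iterations starting from (acc, rest), the accumulator has
-- gained one take-w segment per iteration and rest has lost |l|*w words.
theorem bloop_invariant (w : Nat) (l : List Int) (acc : List String) (rest : List String) :
    l.foldl (fun (st : List String × List String) _ =>
        (st.1 ++ [PySem.Str.join " " (PySem.List.slice st.2 none (some ((w : Nat) : Int)))],
         PySem.List.slice st.2 (some ((w : Nat) : Int)) none)) (acc, rest)
    = (acc ++ (List.range l.length).map
          (fun k => PySem.Str.join " " ((rest.drop (k * w)).take w)),
       rest.drop (l.length * w)) := by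
  induction l generalizing acc rest with
  | nil => simp
  | cons a l ih =>
    rw [List.foldl_cons, ih, PySem.List.slice_to_natCast, PySem.List.slice_from_natCast]
    simp only [List.length_cons, Prod.mk.injEq]
    constructor
    · rw [List.range_succ_eq_map]
      simp only [List.map_cons, List.map_map, List.append_assoc,
        List.cons_append, Nat.zero_mul, List.drop_zero]
      simp only [List.nil_append]
      congr 1
      congr 1
      apply List.map_congr_left
      intro k _
      simp only [Function.comp_apply, List.drop_drop, Nat.succ_eq_add_one]
      have h : w + k * w = (k + 1) * w := by ring
      rw [h]
    · rw [List.drop_drop]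
      congr 1
      ring

theorem flatMap_single {α β : Type} (g : α → β) (l : List α) :
    l.flatMap (fun x => [g x]) = l.map g := by
  induction l with
  | nil => rfl
  | cons a l ih => simp [ih]

theorem main_eq (text : String) (n : Int) (hpre : n ≠ 0) :
    redistribute_text_py text n = redistribute_text_py_alt text n := by
  simp only [redistribute_text_py, redistribute_text_py_alt]
  by_cases hn : n ≤ 0
  · have h0 : n.toNat = 0 := by omega
    rw [if_pos hn, PySem.List.pyRange_zero, h0]
    simp
  · rw [if_neg hn]
    set words := PySem.Str.split₀ text with hw
    set wps := PySem.Int.floordiv ((words.length : Nat) : Int) n with hwps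
    have hwnn : 0 ≤ wps := by
      rw [hwps, PySem.Int.floordiv_eq_ediv_of_pos (by omega)]
      exact Int.ediv_nonneg (by positivity) (by omega)
    obtain ⟨w, hwcast⟩ : ∃ w : Nat, wps = (w : Int) := ⟨wps.toNat, by omega⟩
    obtain ⟨m, hm⟩ : ∃ m : Nat, n = (m : Int) + 1 := ⟨(n - 1).toNat, by omega⟩
    rw [hwcast, hm]
    have hm1 : ((m : Int) + 1 - 1) = (m : Int) := by ring
    rw [hm1, bloop_invariant]
    have hlen : (PySem.List.pyRange 0 ((m : Nat) : Int)).length = m := by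
      rw [PySem.List.pyRange_zero_nat]; simp
    rw [hlen]
    rw [PySem.List.foldl_append_eq_flatMap
      (fun i => [PySem.Str.join " " (PySem.List.slice words (some (i * (w : Int)))
        (some (if i = (m : Int) then ((words.length : Nat) : Int)
               else (i + 1) * (w : Int))))])]
    rw [PySem.List.pyRange_one_succ_right (by positivity), List.flatMap_append, flatMap_single]
    simp only [List.nil_append, List.flatMap_cons, List.flatMap_nil, List.append_nil]
    congr 1
    · rw [PySem.List.pyRange_zero_nat, List.map_map]
      apply List.map_congr_left
      intro k hk
      simp only [Function.comp_apply]
      rw [if_neg (by simp at hk; omega)]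
      have h1 : ((k : Int) * (w : Int)) = ((k * w : Nat) : Int) := by push_cast; ring
      have h2 : (((k : Int)) + 1) * (w : Int) = ((k * w : Nat) : Int) + ((w : Nat) : Int) := by
        push_cast; ring
      rw [h1, h2, PySem.List.slice_natCast_add]
    · have h3 : ((m : Int) * (w : Int)) = ((m * w : Nat) : Int) := by push_cast; ring
      rw [if_pos trivial, h3, PySem.List.slice_natCast, List.take_of_length_le (by simp)]

-- ===== VERDICT (by name: the statement is the Claim_ definition above) =====
theorem redistribute_text_py_spec : Claim_equal_redistribute_text_py := by
  intro text n _ hpre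
  unfold Spec_redistribute_text_py
  exact main_eq text n hpre
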